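-- pv_equiv track=rewrite | github.com/TeleRehaBDSS/TeleRehaB_Home_System | clinic_main.py | reorder_exercises
-- ===== SOURCE A (Python) =====
-- def reorder_exercises(exercises): #Function that add the exer and cognitive games at the end
--     priority_ids = list(range(1, 28))
--     special_id = 43
--
--     # Split exercises
--     priority_exercises = [ex for ex in exercises if ex["exerciseId"] in priority_ids]
--     special_exercise = [ex for ex in exercises if ex["exerciseId"] == special_id]
--     other_exercises = [ex for ex in exercises if ex["exerciseId"] not in priority_ids + [special_id]]
--
--     # Sort each group
--     priority_exercises.sort(key=lambda x: x["exerciseId"])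
--     other_exercises.sort(key=lambda x: x["exerciseId"])
--
--     # Concatenate
--     return priority_exercises + special_exercise + other_exercises
-- ===== SOURCE B (Python) =====
-- def reorder_exercises(exercises):
--     def rank(k):
--         return 0 if 1 <= k <= 27 else (1 if k == 43 else 2)
--     return sorted(exercises, key=lambda ex: (rank(ex["exerciseId"]), ex["exerciseId"]))
-- ===== Notes on version B (the rewrite author's own statement) =====
-- stated objective: simpler
-- what changed: Replaces A's three list-comprehension filters, two separate sorts and a concatenation by a single stable sort under the tuple key (rank, exerciseId), where rank is 0 for ids 1..27, 1 for id 43, 2 otherwise; stability keeps the special (rank-1) exercises in input order exactly as A does.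
import Mathlib
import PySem

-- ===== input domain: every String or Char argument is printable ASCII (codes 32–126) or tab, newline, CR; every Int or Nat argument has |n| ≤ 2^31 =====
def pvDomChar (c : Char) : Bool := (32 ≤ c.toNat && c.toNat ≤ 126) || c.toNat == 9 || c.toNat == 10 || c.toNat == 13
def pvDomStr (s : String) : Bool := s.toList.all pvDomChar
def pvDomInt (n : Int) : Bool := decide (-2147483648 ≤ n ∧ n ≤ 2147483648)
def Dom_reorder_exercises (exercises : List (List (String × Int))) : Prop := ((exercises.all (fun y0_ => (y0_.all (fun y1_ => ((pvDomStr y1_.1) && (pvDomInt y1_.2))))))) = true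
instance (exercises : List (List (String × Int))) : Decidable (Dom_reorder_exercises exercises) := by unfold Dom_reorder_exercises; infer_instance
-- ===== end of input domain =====

-- B replaces A's three filters + two sorts + concatenation by ONE stable sort under the
-- tuple key (rank, exerciseId); objective: simpler (one pass over a single sort).

-- ex["exerciseId"] : dict lookup = first match in the association list; Python raises
-- KeyError when the key is missing — Pre_ excludes that, so the `.getD 0` default is
-- never reached on admitted inputs. (Used by both ports: both Pythons evaluate
-- ex["exerciseId"] the same way.)
def pvKid (ex : List (String × Int)) : Int := (List.lookup "exerciseId" ex).getD 0

-- ===== PORT A =====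
def reorder_exercises (exercises : List (List (String × Int))) : List (List (String × Int)) :=
  let priority_ids := PySem.List.pyRange 1 28                 -- list(range(1, 28))
  let special_id : Int := 43
  -- Split exercises
  let priority_exercises := exercises.filter (fun ex => priority_ids.contains (pvKid ex))
  let special_exercise := exercises.filter (fun ex => pvKid ex == special_id)
  let other_exercises := exercises.filter (fun ex => !((priority_ids ++ [special_id]).contains (pvKid ex)))
  -- Sort each group (list.sort is the same stable sort as sorted())
  let priority_exercises := PySem.List.sorted priority_exercises (fun x => pvKid x)
  let other_exercises := PySem.List.sorted other_exercises (fun x => pvKid x)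
  -- Concatenate
  priority_exercises ++ special_exercise ++ other_exercises

-- ===== PORT B =====
def pvRank (ex : List (String × Int)) : Int :=
  if 1 ≤ pvKid ex ∧ pvKid ex ≤ 27 then 0 else if pvKid ex = 43 then 1 else 2

def reorder_exercises_alt (exercises : List (List (String × Int))) : List (List (String × Int)) :=
  PySem.List.sorted2 exercises pvRank pvKid

-- ===== PRECONDITION & SPEC =====
-- Pre_ excludes exactly the inputs where the Python raises KeyError: some exercise dict
-- has no "exerciseId" key.
def Pre_reorder_exercises (exercises : List (List (String × Int))) : Prop :=
  ∀ ex ∈ exercises, (List.lookup "exerciseId" ex).isSome = true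
instance (exercises : List (List (String × Int))) : Decidable (Pre_reorder_exercises exercises) := by unfold Pre_reorder_exercises; infer_instance

def pvWitness_reorder_exercises : (List (List (String × Int))) := [[("exerciseId", 43)], [("exerciseId", 3)]]

def Spec_reorder_exercises (exercises : List (List (String × Int))) (out : List (List (String × Int))) : Prop := out = reorder_exercises_alt exercises
instance (exercises : List (List (String × Int))) (out : List (List (String × Int))) : Decidable (Spec_reorder_exercises exercises out) := by unfold Spec_reorder_exercises; infer_instance

-- ===== CLAIM (what is proved, stated in full; the proofs are below) =====
def Claim_equal_reorder_exercises : Prop := ∀ (exercises : List (List (String × Int))), Dom_reorder_exercises exercises → Pre_reorder_exercises exercises → Spec_reorder_exercises exercises (reorder_exercises exercises)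

-- ===== LEMMAS AND PROOFS =====

-- the comparison sorted2 uses (reverse = false): rank first, then id
def pvLt2 (a b : List (String × Int)) : Bool :=
  decide (pvRank a < pvRank b) || (!decide (pvRank b < pvRank a) && decide (pvKid a < pvKid b))

theorem insertBy_append_of_forall_false {α : Type} (before : α → α → Bool) (x : α)
    (l₁ l₂ : List α) (h : ∀ y ∈ l₁, before x y = false) :
    PySem.List.insertBy before x (l₁ ++ l₂) = l₁ ++ PySem.List.insertBy before x l₂ := by
  induction l₁ with
  | nil => rfl
  | cons y ys ih =>
      simp only [List.cons_append, PySem.List.insertBy, h y (by simp)]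
      simp [ih (fun z hz => h z (by simp [hz]))]

theorem insertBy_append_of_forall_true {α : Type} (before : α → α → Bool) (x : α)
    (l₁ l₂ : List α) (h : ∀ y ∈ l₂, before x y = true) :
    PySem.List.insertBy before x (l₁ ++ l₂) = PySem.List.insertBy before x l₁ ++ l₂ := by
  induction l₁ with
  | nil =>
      cases l₂ with
      | nil => rfl
      | cons z zs => simp [PySem.List.insertBy, h z (by simp)]
  | cons y ys ih =>
      simp only [List.cons_append, PySem.List.insertBy]
      cases hb : before x y <;> simp [ih]

theorem insertBy_congr {α : Type} (b₁ b₂ : α → α → Bool) (x : α) (l : List α)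
    (h : ∀ y ∈ l, b₁ x y = b₂ x y) :
    PySem.List.insertBy b₁ x l = PySem.List.insertBy b₂ x l := by
  induction l with
  | nil => rfl
  | cons y ys ih =>
      simp only [PySem.List.insertBy, h y (by simp)]
      cases hb : b₂ x y <;> simp [ih (fun z hz => h z (by simp [hz]))]

theorem pvRank_cases (ex : List (String × Int)) :
    (pvRank ex = 0 ∧ 1 ≤ pvKid ex ∧ pvKid ex ≤ 27) ∨ (pvRank ex = 1 ∧ pvKid ex = 43) ∨
      (pvRank ex = 2 ∧ ¬(1 ≤ pvKid ex ∧ pvKid ex ≤ 27) ∧ pvKid ex ≠ 43) := by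
  unfold pvRank; split_ifs with h1 h2 <;> simp_all

theorem pvLt2_of_rank_lt (x y : List (String × Int)) (h : pvRank x < pvRank y) :
    pvLt2 x y = true := by simp [pvLt2, h]

theorem pvLt2_of_rank_gt (x y : List (String × Int)) (h : pvRank y < pvRank x) :
    pvLt2 x y = false := by
  simp [pvLt2, h, show ¬ pvRank x < pvRank y by omega]

theorem pvLt2_of_rank_eq (x y : List (String × Int)) (h : pvRank x = pvRank y) :
    pvLt2 x y = decide (pvKid x < pvKid y) := by
  simp [pvLt2, h]

-- the three boolean group predicates, in rank form
def pvP0 (ex : List (String × Int)) : Bool := decide (pvRank ex = 0)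
def pvP1 (ex : List (String × Int)) : Bool := decide (pvRank ex = 1)
def pvP2 (ex : List (String × Int)) : Bool := decide (pvRank ex = 2)

theorem rank_of_mem_sorted_filter (p : List (String × Int) → Bool) (xs : List (List (String × Int)))
    (y : List (String × Int)) (hy : y ∈ PySem.List.sorted (xs.filter p) (fun x => pvKid x)) :
    p y = true := by
  rw [PySem.List.mem_sorted] at hy
  exact (List.mem_filter.mp hy).2

-- the invariant: one stable insertion sort under (rank, id) maintains the three-group shape
theorem pvInv (xs : List (List (String × Int))) :
    List.foldl (fun acc x => PySem.List.insertBy pvLt2 x acc) [] xs =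
      PySem.List.sorted (xs.filter pvP0) (fun x => pvKid x) ++ xs.filter pvP1 ++
        PySem.List.sorted (xs.filter pvP2) (fun x => pvKid x) := by
  induction xs using List.reverseRecOn with
  | nil => rfl
  | append_singleton xs x ih =>
      rw [List.foldl_append, List.foldl_cons, List.foldl_nil, ih]
      have hsorted : ∀ p : List (String × Int) → Bool,
          PySem.List.sorted ((xs ++ [x]).filter p) (fun z => pvKid z) =
            if p x then
              PySem.List.insertBy (fun a b => decide (pvKid a < pvKid b)) x
                (PySem.List.sorted (xs.filter p) (fun z => pvKid z))
            else PySem.List.sorted (xs.filter p) (fun z => pvKid z) := by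
        intro p
        rw [PySem.List.sorted_eq_foldl_insertBy, PySem.List.sorted_eq_foldl_insertBy,
          List.filter_append]
        cases hp : p x <;> simp [hp, List.foldl_append]
      rcases pvRank_cases x with ⟨hr, _⟩ | ⟨hr, hk⟩ | ⟨hr, _⟩
      · -- rank 0: inserted into the first block, by id
        have hfil : ∀ p : List (String × Int) → Bool, ((xs ++ [x]).filter p) =
            xs.filter p ++ if p x then [x] else [] := by
          intro p; rw [List.filter_append]; cases hp : p x <;> simp [hp]
        rw [List.append_assoc, insertBy_append_of_forall_true _ _ _ _ (by
          intro y hy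
          rcases List.mem_append.mp hy with hy | hy
          · have := List.mem_filter.mp hy
            apply pvLt2_of_rank_lt; simp [pvP1] at this; omega
          · have := rank_of_mem_sorted_filter pvP2 xs y hy
            apply pvLt2_of_rank_lt; simp [pvP2] at this; omega)]
        rw [insertBy_congr pvLt2 (fun a b => decide (pvKid a < pvKid b)) x _ (by
          intro y hy
          have := rank_of_mem_sorted_filter pvP0 xs y hy
          simp [pvP0] at this
          exact pvLt2_of_rank_eq x y (by omega))]
        rw [hsorted pvP0, hfil pvP1, hfil pvP2]
        simp [pvP0, pvP1, pvP2, hr, List.append_assoc]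
      · -- rank 1: lands exactly at the end of the middle block (stability on equal keys)
        have hmid : ∀ y ∈ PySem.List.sorted (xs.filter pvP0) (fun z => pvKid z) ++ xs.filter pvP1,
            pvLt2 x y = false := by
          intro y hy
          rcases List.mem_append.mp hy with hy | hy
          · have := rank_of_mem_sorted_filter pvP0 xs y hy
            apply pvLt2_of_rank_gt; simp [pvP0] at this; omega
          · have h1 := (List.mem_filter.mp hy).2
            simp [pvP1] at h1
            rcases pvRank_cases y with ⟨h, _⟩ | ⟨_, hk'⟩ | ⟨h, _⟩
            · omega
            · rw [pvLt2_of_rank_eq x y (by omega), hk, hk']; simp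
            · omega
        rw [insertBy_append_of_forall_false _ _ _ _ hmid]
        have htail : PySem.List.insertBy pvLt2 x
            (PySem.List.sorted (xs.filter pvP2) (fun z => pvKid z)) =
            x :: PySem.List.sorted (xs.filter pvP2) (fun z => pvKid z) := by
          have := insertBy_append_of_forall_true pvLt2 x []
            (PySem.List.sorted (xs.filter pvP2) (fun z => pvKid z)) (by
              intro y hy
              have := rank_of_mem_sorted_filter pvP2 xs y hy
              apply pvLt2_of_rank_lt; simp [pvP2] at this; omega)
          simpa [PySem.List.insertBy] using this
        rw [htail, hsorted pvP0, hsorted pvP2, List.filter_append]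
        simp [pvP0, pvP1, pvP2, hr, List.append_assoc]
      · -- rank 2: inserted into the last block, by id
        rw [insertBy_append_of_forall_false _ _ _ _ (by
          intro y hy
          rcases List.mem_append.mp hy with hy | hy
          · have := rank_of_mem_sorted_filter pvP0 xs y hy
            apply pvLt2_of_rank_gt; simp [pvP0] at this; omega
          · have := (List.mem_filter.mp hy).2
            apply pvLt2_of_rank_gt; simp [pvP1] at this; omega)]
        rw [insertBy_congr pvLt2 (fun a b => decide (pvKid a < pvKid b)) x _ (by
          intro y hy
          have := rank_of_mem_sorted_filter pvP2 xs y hy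
          simp [pvP2] at this
          exact pvLt2_of_rank_eq x y (by omega))]
        rw [hsorted pvP0, hsorted pvP2, List.filter_append]
        simp [pvP0, pvP1, pvP2, hr, List.append_assoc]

-- A's three membership tests are exactly the three rank values
theorem filterA_eq_P0 (ex : List (String × Int)) :
    (PySem.List.pyRange 1 28).contains (pvKid ex) = pvP0 ex := by
  have h := @PySem.List.mem_pyRange_one 1 28 (pvKid ex)
  rcases pvRank_cases ex with ⟨hr, h1, h2⟩ | ⟨hr, hk⟩ | ⟨hr, h1, h2⟩ <;>
    simp [pvP0, hr, h] <;> omega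

theorem filterA_eq_P1 (ex : List (String × Int)) :
    (pvKid ex == (43 : Int)) = pvP1 ex := by
  rcases pvRank_cases ex with ⟨hr, h1, h2⟩ | ⟨hr, hk⟩ | ⟨hr, h1, h2⟩
  · simp [pvP1, hr]; omega
  · simp [pvP1, hr, hk]
  · simp [pvP1, hr]; omega

theorem filterA_eq_P2 (ex : List (String × Int)) :
    (!((PySem.List.pyRange 1 28 ++ [(43 : Int)]).contains (pvKid ex))) = pvP2 ex := by
  have h := @PySem.List.mem_pyRange_one 1 28 (pvKid ex)
  rcases pvRank_cases ex with ⟨hr, h1, h2⟩ | ⟨hr, hk⟩ | ⟨hr, h1, h2⟩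
  · simp [pvP2, hr, h]; omega
  · simp [pvP2, hr, hk]
  · simp [pvP2, hr, h]; omega

theorem reorder_eq (exercises : List (List (String × Int))) :
    reorder_exercises exercises = reorder_exercises_alt exercises := by
  have hA : reorder_exercises exercises =
      PySem.List.sorted (exercises.filter (fun ex => (PySem.List.pyRange 1 28).contains (pvKid ex))) (fun x => pvKid x) ++
        exercises.filter (fun ex => pvKid ex == (43 : Int)) ++
        PySem.List.sorted (exercises.filter (fun ex => !((PySem.List.pyRange 1 28 ++ [(43 : Int)]).contains (pvKid ex)))) (fun x => pvKid x) := rfl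
  have hB : reorder_exercises_alt exercises =
      List.foldl (fun acc x => PySem.List.insertBy pvLt2 x acc) [] exercises := rfl
  rw [hA, hB, pvInv,
    List.filter_congr (fun ex _ => filterA_eq_P0 ex),
    List.filter_congr (fun ex _ => filterA_eq_P1 ex),
    List.filter_congr (fun ex _ => filterA_eq_P2 ex)]

-- ===== VERDICT (by name: the statement is the Claim_ definition above) =====
theorem reorder_exercises_spec : Claim_equal_reorder_exercises := by
  intro exercises _ _
  exact (reorder_eq exercises).symm ▸ rfl
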